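-- pv_equiv track=rewrite | github.com/191059014/python_study | util/GlobalUtils.py | transfer_data_to_dict_groupby
-- ===== SOURCE A (Python) =====
-- def joinUnderline(*vals):
--     return "_".join(vals)
--
-- def transfer_data_to_dict_groupby(datas, keyCols, valCols):
--     dicts = {}
--     for row in datas:
--         key = joinUnderline(*map(lambda keyColName: row[keyColName], keyCols))
--         if valCols is None:
--             val = {row, }
--         else:
--             val = {joinUnderline(*map(lambda valColName: row[valColName], valCols)), }
--         if key in dicts:
--             dicts[key].update(val)
--         else:
--             dicts[key] = val
--     return dicts
-- ===== SOURCE B (Python) =====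
-- def transfer_data_to_dict_groupby(datas, keyCols, valCols):
--     # Partition-style grouping: compute (key, value) pairs once, then repeatedly
--     # peel off the first remaining key's whole group.  Return-value equivalent to A.
--     pairs = [("_".join(row[c] for c in keyCols),
--               row if valCols is None else "_".join(row[c] for c in valCols))
--              for row in datas]
--     result = {}
--     while pairs:
--         k = pairs[0][0]
--         result[k] = {v for k2, v in pairs if k2 == k}
--         pairs = [p for p in pairs if p[0] != k]
--     return result
-- ===== Notes on version B (the rewrite author's own statement) =====
-- stated objective: alternative
-- what changed: A builds the result incrementally in one pass, testing each row's key against the accumulated dict and unioning singleton sets; B first materialises all (key, value) pairs and then groups by repeated partitioning: it peels off the first remaining key, collects that key's whole group in one comprehension, and recurses on the pairs with other keys.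
import Mathlib
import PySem

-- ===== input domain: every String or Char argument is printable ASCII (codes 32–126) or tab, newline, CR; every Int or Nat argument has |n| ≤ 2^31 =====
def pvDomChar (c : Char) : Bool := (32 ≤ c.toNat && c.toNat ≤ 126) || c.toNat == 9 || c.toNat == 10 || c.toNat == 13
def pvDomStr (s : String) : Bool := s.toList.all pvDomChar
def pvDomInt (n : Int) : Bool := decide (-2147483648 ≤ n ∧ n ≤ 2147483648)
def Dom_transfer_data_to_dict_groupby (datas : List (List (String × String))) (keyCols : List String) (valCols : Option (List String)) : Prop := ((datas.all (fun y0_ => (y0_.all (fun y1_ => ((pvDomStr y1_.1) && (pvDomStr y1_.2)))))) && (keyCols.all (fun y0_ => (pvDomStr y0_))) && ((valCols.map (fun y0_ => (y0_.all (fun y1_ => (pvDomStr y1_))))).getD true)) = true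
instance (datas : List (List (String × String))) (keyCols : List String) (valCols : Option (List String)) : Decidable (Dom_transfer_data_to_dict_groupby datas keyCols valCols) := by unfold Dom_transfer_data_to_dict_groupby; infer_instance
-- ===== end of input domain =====

-- ===== PORT A =====
-- B replaces A's incremental one-pass set-accumulation by partition-style grouping
-- (materialise all (key, value) pairs, peel off whole groups); return values proved equal on Pre_.
-- row[c] is a dict lookup; '.getD ""' is reached only on a KeyError input, which Pre_ excludes.
def joinUnderline (vals : List String) : String := PySem.Str.join "_" vals

def transfer_data_to_dict_groupby (datas : List (List (String × String))) (keyCols : List String) (valCols : Option (List String)) : List (String × List String) :=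
  (datas.foldl
    (fun dicts row =>
      let key := joinUnderline (keyCols.map (fun c => (PySem.Dict.get? (PySem.Dict.mk row) c).getD ""))
      let val : List String :=
        match valCols with
        | none => [""]  -- Python: val = {row,} raises TypeError (dict unhashable); Pre_ forces datas = [] in this branch
        | some vcs => [joinUnderline (vcs.map (fun c => (PySem.Dict.get? (PySem.Dict.mk row) c).getD ""))]
      if PySem.Dict.contains dicts key then
        PySem.Dict.modify dicts key [] (fun s => val.foldl PySem.Set.add s)  -- dicts[key].update(val)
      else
        PySem.Dict.insert dicts key val)  -- dicts[key] = val
    PySem.Dict.empty).items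

-- ===== PORT B =====
-- the (key, value) pair of one row ("_".join of the named columns; for valCols = None the Python
-- value is the unhashable row itself and the set comprehension raises TypeError, so Pre_ forces datas = [])
def pvKeyVal (keyCols : List String) (valCols : Option (List String)) (row : List (String × String)) : String × String :=
  (PySem.Str.join "_" (keyCols.map (fun c => (PySem.Dict.get? (PySem.Dict.mk row) c).getD "")),
   match valCols with
   | none => ""
   | some vcs => PySem.Str.join "_" (vcs.map (fun c => (PySem.Dict.get? (PySem.Dict.mk row) c).getD "")))

-- the while loop: peel off the first key's whole group, recurse on the remaining pairs
def pvGroup (pairs : List (String × String)) : List (String × List String) :=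
  match pairs with
  | [] => []
  | (k, v) :: tl =>
      (k, PySem.Set.ofList ((((k, v) :: tl).filter (fun p => p.1 == k)).map Prod.snd)) ::
        pvGroup (tl.filter (fun p => p.1 != k))
termination_by pairs.length
decreasing_by
  simp only [List.length_cons, List.length_unattach]
  exact Nat.lt_succ_of_le (le_trans (List.length_filter_le _ _) (by simp))

def transfer_data_to_dict_groupby_alt (datas : List (List (String × String))) (keyCols : List String) (valCols : Option (List String)) : List (String × List String) :=
  pvGroup (datas.map (pvKeyVal keyCols valCols))

-- ===== PRECONDITION & SPEC =====
-- Pre_ excludes exactly the inputs where Python A raises: a row missing a named key/value column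
-- (KeyError), and valCols = None with nonempty datas (TypeError: unhashable dict in {row,}).
def Pre_transfer_data_to_dict_groupby (datas : List (List (String × String))) (keyCols : List String) (valCols : Option (List String)) : Prop :=
  (valCols = none → datas = []) ∧
  ∀ row ∈ datas,
    (∀ c ∈ keyCols, (PySem.Dict.get? (PySem.Dict.mk row) c).isSome = true) ∧
    (∀ c ∈ valCols.getD [], (PySem.Dict.get? (PySem.Dict.mk row) c).isSome = true)
instance (datas : List (List (String × String))) (keyCols : List String) (valCols : Option (List String)) : Decidable (Pre_transfer_data_to_dict_groupby datas keyCols valCols) := by unfold Pre_transfer_data_to_dict_groupby; infer_instance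

def pvWitness_transfer_data_to_dict_groupby : (List (List (String × String))) × List String × Option (List String) :=
  ([[("a", "1"), ("b", "2")], [("a", "1"), ("b", "3")]], ["a"], some ["b"])

def Spec_transfer_data_to_dict_groupby (datas : List (List (String × String))) (keyCols : List String) (valCols : Option (List String)) (out : List (String × List String)) : Prop := out = transfer_data_to_dict_groupby_alt datas keyCols valCols
instance (datas : List (List (String × String))) (keyCols : List String) (valCols : Option (List String)) (out : List (String × List String)) : Decidable (Spec_transfer_data_to_dict_groupby datas keyCols valCols out) := by unfold Spec_transfer_data_to_dict_groupby; infer_instance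

-- ===== CLAIM (what is proved, stated in full; the proofs are below) =====
def Claim_equal_transfer_data_to_dict_groupby : Prop := ∀ (datas : List (List (String × String))) (keyCols : List String) (valCols : Option (List String)), Dom_transfer_data_to_dict_groupby datas keyCols valCols → Pre_transfer_data_to_dict_groupby datas keyCols valCols → Spec_transfer_data_to_dict_groupby datas keyCols valCols (transfer_data_to_dict_groupby datas keyCols valCols)

-- ===== LEMMAS AND PROOFS =====
-- the values attached to key k among the pairs ps
def pvVals (k : String) (ps : List (String × String)) : List String :=
  (ps.filter (fun p => p.1 == k)).map Prod.snd

-- the common normal form both ports are reduced to: distinct keys in first-occurrence order,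
-- each paired with the set of its values in first-occurrence order
def pvCanon (ps : List (String × String)) : List (String × List String) :=
  (PySem.Set.ofList (ps.map Prod.fst)).map (fun k => (k, PySem.Set.ofList (pvVals k ps)))

-- A's loop body is a single Dict.modify
theorem pvStepA_eq_modify (d : PySem.Dict String (List String)) (k x : String) :
    (if PySem.Dict.contains d k then
        PySem.Dict.modify d k [] (fun s => [x].foldl PySem.Set.add s)
      else PySem.Dict.insert d k [x])
      = PySem.Dict.modify d k [] (fun s => PySem.Set.add s x) := by
  by_cases h : PySem.Dict.contains d k
  · simp [h, PySem.Dict.modify, List.foldl]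
  · rw [if_neg (by simp [h])]
    simp only [PySem.Dict.modify]
    rw [PySem.Dict.getD_of_not_contains d [] (by simpa using h)]
    simp [PySem.Set.add, PySem.Set.contains]

-- value at key c after A's modify-fold
theorem pvGetD_foldl_modify_add (l : List (String × String)) (d : PySem.Dict String (List String)) (c : String) :
    (l.foldl (fun d p => PySem.Dict.modify d p.1 [] (fun s => PySem.Set.add s p.2)) d).getD c []
      = (pvVals c l).foldl PySem.Set.add (d.getD c []) := by
  induction l generalizing d with
  | nil => simp [pvVals]
  | cons p t ih =>
    rcases p with ⟨a, b⟩
    rw [List.foldl_cons, ih, PySem.Dict.getD_modify]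
    by_cases h : c = a
    · subst h
      simp [pvVals]
    · simp [pvVals, h, Ne.symm h]

-- A's modify-fold, as items, is the normal form
theorem pvFoldA_items (ps : List (String × String)) :
    (ps.foldl (fun d p => PySem.Dict.modify d p.1 [] (fun s => PySem.Set.add s p.2)) PySem.Dict.empty).items
      = pvCanon ps := by
  have hnd : (ps.foldl (fun d p => PySem.Dict.modify d p.1 [] (fun s => PySem.Set.add s p.2)) PySem.Dict.empty).keys.Nodup := by
    exact PySem.Dict.nodup_keys_foldl_modify_key ps Prod.fst [] (fun _ p s => PySem.Set.add s p.2) PySem.Dict.empty (by simp)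
  rw [PySem.Dict.items_eq_map_keys _ hnd []]
  rw [PySem.Dict.keys_foldl_modify_key ps Prod.fst [] (fun _ p s => PySem.Set.add s p.2)]
  have hk : PySem.Set.update (PySem.Dict.empty : PySem.Dict String (List String)).keys (ps.map Prod.fst) = PySem.Set.ofList (ps.map Prod.fst) := by
    simp [PySem.Set.update, PySem.Set.ofList_eq_foldl]
  rw [hk]
  unfold pvCanon
  apply List.map_congr_left
  intro k hk
  rw [pvGetD_foldl_modify_add, PySem.Dict.getD_empty, ← PySem.Set.ofList_eq_foldl]

theorem pvFoldl_add_append (xs s t : List String) (h : ∀ y ∈ xs, y ∉ s) :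
    xs.foldl PySem.Set.add (s ++ t) = s ++ xs.foldl PySem.Set.add t := by
  induction xs generalizing t with
  | nil => simp
  | cons y ys ih =>
    have hy : y ∉ s := h y (by simp)
    have hstep : PySem.Set.add (s ++ t) y = s ++ PySem.Set.add t y := by
      have hs : s.contains y = false := by simpa using hy
      simp only [PySem.Set.add, PySem.Set.contains, List.contains_append, hs, Bool.false_or]
      split_ifs <;> simp [List.append_assoc]
    rw [List.foldl_cons, List.foldl_cons, hstep, ih _ (fun z hz => h z (by simp [hz]))]

theorem pvFoldl_add_filter (xs : List String) (s : PySem.Set String) (x : String) (h : x ∈ s) :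
    (xs.filter (fun y => y != x)).foldl PySem.Set.add s = xs.foldl PySem.Set.add s := by
  induction xs generalizing s with
  | nil => simp
  | cons y ys ih =>
    by_cases hyx : y = x
    · subst hyx
      have hadd : PySem.Set.add s y = s := by
        simp [PySem.Set.add, PySem.Set.contains, h]
      simp [hadd, ih s h]
    · have : (y != x) = true := by simp [hyx]
      rw [List.filter_cons, if_pos this, List.foldl_cons, List.foldl_cons]
      exact ih _ ((PySem.Set.mem_add s y x).mpr (Or.inl h))

theorem pvOfList_cons (x : String) (xs : List String) :
    PySem.Set.ofList (x :: xs) = x :: PySem.Set.ofList (xs.filter (fun y => y != x)) := by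
  rw [PySem.Set.ofList_eq_foldl, List.foldl_cons]
  have h0 : PySem.Set.add ([] : List String) x = [x] := by
    simp [PySem.Set.add, PySem.Set.contains]
  rw [h0, ← pvFoldl_add_filter xs [x] x (by simp)]
  have hmem : ∀ y ∈ xs.filter (fun y => y != x), y ∉ ([x] : List String) := by
    intro y hy
    have := (List.mem_filter.mp hy).2
    simp only [bne_iff_ne, ne_eq] at this
    simpa using this
  have := pvFoldl_add_append (xs.filter (fun y => y != x)) [x] [] hmem
  simp only [List.append_nil] at this
  rw [this, ← PySem.Set.ofList_eq_foldl]
  rfl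

theorem pvVals_filter_ne (tl : List (String × String)) (k k' : String) (h : k' ≠ k) :
    pvVals k' (tl.filter (fun p => p.1 != k)) = pvVals k' tl := by
  unfold pvVals
  rw [List.filter_filter]
  congr 1
  apply List.filter_congr
  intro a _
  by_cases ha : a.1 = k'
  · simp [ha, bne_iff_ne, h]
  · simp [ha]

-- B's partition loop also computes the normal form
theorem pvGroup_eq_canon (ps : List (String × String)) : pvGroup ps = pvCanon ps := by
  induction ps using pvGroup.induct with
  | case1 => simp [pvGroup.eq_def, pvCanon, pvVals]
  | case2 k v tl ih =>
    simp only [List.unattach_filter, List.unattach_attach] at ih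
    rw [pvGroup, ih]
    unfold pvCanon
    rw [show ((k, v) :: tl).map Prod.fst = k :: tl.map Prod.fst from rfl, pvOfList_cons, List.map_cons]
    have hfm : (tl.map Prod.fst).filter (fun y => y != k) = (tl.filter (fun p => p.1 != k)).map Prod.fst := by
      rw [List.filter_map]
      rfl
    rw [hfm]
    refine congrArg₂ List.cons rfl ?_
    apply List.map_congr_left
    intro k' hk'
    have hk'mem : k' ∈ (tl.filter (fun p => p.1 != k)).map Prod.fst := (PySem.Set.mem_ofList _ _).mp hk'
    obtain ⟨p, hpmem, rfl⟩ := List.mem_map.mp hk'mem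
    have hne : p.1 ≠ k := by
      have := (List.mem_filter.mp hpmem).2
      simpa using this
    rw [pvVals_filter_ne tl k p.1 hne]
    have hhead : pvVals p.1 ((k, v) :: tl) = pvVals p.1 tl := by
      simp [pvVals, show (k == p.1) = false by simp [Ne.symm hne]]
    rw [hhead]

-- ===== VERDICT (by name: the statement is the Claim_ definition above) =====
theorem transfer_data_to_dict_groupby_spec : Claim_equal_transfer_data_to_dict_groupby := by
  intro datas keyCols valCols _ hpre
  unfold Spec_transfer_data_to_dict_groupby
  cases valCols with
  | none =>
      have h : datas = [] := hpre.1 rfl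
      subst h
      simp [transfer_data_to_dict_groupby, transfer_data_to_dict_groupby_alt, pvGroup.eq_def, PySem.Dict.empty]
  | some vcs =>
      show transfer_data_to_dict_groupby datas keyCols (some vcs)
        = transfer_data_to_dict_groupby_alt datas keyCols (some vcs)
      unfold transfer_data_to_dict_groupby transfer_data_to_dict_groupby_alt
      have hbody : (fun (dicts : PySem.Dict String (List String)) row =>
          let key := joinUnderline (keyCols.map (fun c => (PySem.Dict.get? (PySem.Dict.mk row) c).getD ""))
          let val : List String :=
            match (some vcs : Option (List String)) with
            | none => [""]
            | some vcs => [joinUnderline (vcs.map (fun c => (PySem.Dict.get? (PySem.Dict.mk row) c).getD ""))]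
          if PySem.Dict.contains dicts key then
            PySem.Dict.modify dicts key [] (fun s => val.foldl PySem.Set.add s)
          else
            PySem.Dict.insert dicts key val)
          = (fun dicts row => PySem.Dict.modify dicts (pvKeyVal keyCols (some vcs) row).1 []
              (fun s => PySem.Set.add s (pvKeyVal keyCols (some vcs) row).2)) := by
        funext dicts row
        simpa [pvKeyVal, joinUnderline] using
          pvStepA_eq_modify dicts
            (PySem.Str.join "_" (keyCols.map (fun c => (PySem.Dict.get? (PySem.Dict.mk row) c).getD "")))
            (PySem.Str.join "_" (vcs.map (fun c => (PySem.Dict.get? (PySem.Dict.mk row) c).getD "")))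
      rw [hbody, ← List.foldl_map (f := pvKeyVal keyCols (some vcs)) (g := fun (d : PySem.Dict String (List String)) (p : String × String) => PySem.Dict.modify d p.1 [] (fun s => PySem.Set.add s p.2)), pvFoldA_items, pvGroup_eq_canon]
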